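-- pv_equiv track=rewrite | github.com/AEPForGTE/ILLOD | ILLOD_IST/Function_Pool.py | stop_words_handling
-- ===== SOURCE A (Python) =====
-- def stop_words_handling(term):
--     if len(term.split()) < 2:
--         return term
--     else:
--         splitted_term = term.split()
--         stop_words = set(["for", "and", "of", "in", "via", "be"])
--         if splitted_term[0] in stop_words:
--             stop_words = stop_words - set([splitted_term[0]])
--         for sw in stop_words:
--             while sw in splitted_term:
--                 splitted_term.remove(sw)
--         sanitized_term = " ".join([w for w in splitted_term])
--         return sanitized_term
-- ===== SOURCE B (Python) =====
-- def stop_words_handling(term):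
--     words = term.split()
--     if len(words) < 2:
--         return term
--     stops = {"for", "and", "of", "in", "via", "be"}
--     stops.discard(words[0])
--     return " ".join(w for w in words if w not in stops)
-- ===== Notes on version B (the rewrite author's own statement) =====
-- stated objective: simpler
-- what changed: A's outer loop over the stop-word set with an inner while/remove scan per stop word is replaced by discarding the first word from the stop set and one forward filter pass over the word list.
import Mathlib
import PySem

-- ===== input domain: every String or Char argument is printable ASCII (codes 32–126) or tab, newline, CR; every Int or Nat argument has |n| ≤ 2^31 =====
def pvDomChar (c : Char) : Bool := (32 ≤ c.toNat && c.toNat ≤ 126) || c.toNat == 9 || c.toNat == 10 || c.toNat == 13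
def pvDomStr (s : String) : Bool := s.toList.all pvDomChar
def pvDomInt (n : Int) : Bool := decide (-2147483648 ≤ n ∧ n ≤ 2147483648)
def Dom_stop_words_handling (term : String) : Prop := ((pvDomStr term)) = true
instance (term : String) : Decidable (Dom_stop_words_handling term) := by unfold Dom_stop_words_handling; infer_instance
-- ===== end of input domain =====

-- B replaces A's loop over the stop-word set with inner while-remove scans by a single
-- forward filter pass over the word list (objective: simpler).

-- ===== PORT A =====
-- 'while sw in splitted_term: splitted_term.remove(sw)'
def pvWhileRemove (sw : String) (xs : List String) : List String :=
  match h : PySem.List.remove? xs sw with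
  | some ys => pvWhileRemove sw ys
  | none => xs
termination_by xs.length
decreasing_by
  have hm : sw ∈ xs := by
    by_contra hn
    simp [(PySem.List.remove?_eq_none_iff xs sw).mpr hn] at h
  rw [PySem.List.remove?_eq_some_erase xs sw hm] at h
  injection h with h
  subst h
  have hpos := List.length_pos_of_mem hm
  have : (xs.erase sw).length = xs.length - 1 := by
    rw [List.length_erase]; simp [hm]
  omega

-- A's loop 'for sw in stop_words' iterates a Python set; the result does not depend on
-- the iteration order (each pass removes every occurrence of one word), so iterating the
-- member list in a fixed order is exact.
def stop_words_handling (term : String) : String :=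
  if (PySem.Str.split₀ term).length < 2 then term
  else
    let splitted_term := PySem.Str.split₀ term
    let stop_words : PySem.Set String :=
      PySem.Set.ofList ["for", "and", "of", "in", "via", "be"]
    -- splitted_term[0] is in range here since the list has length ≥ 2
    let first := splitted_term.headD ""
    let stop_words :=
      if first ∈ stop_words then PySem.Set.diff stop_words (PySem.Set.ofList [first])
      else stop_words
    let splitted_term := stop_words.foldl (fun xs sw => pvWhileRemove sw xs) splitted_term
    PySem.Str.join " " splitted_term

-- ===== PORT B =====
def stop_words_handling_alt (term : String) : String :=
  let words := PySem.Str.split₀ term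
  if words.length < 2 then term
  else
    let stops := PySem.Set.discard
      (PySem.Set.ofList ["for", "and", "of", "in", "via", "be"]) (words.headD "")
    PySem.Str.join " " (words.filter (fun w => !(PySem.Set.contains stops w)))

-- ===== PRECONDITION & SPEC =====
def Spec_stop_words_handling (term : String) (out : String) : Prop := out = stop_words_handling_alt term
instance (term : String) (out : String) : Decidable (Spec_stop_words_handling term out) := by unfold Spec_stop_words_handling; infer_instance

-- ===== CLAIM (what is proved, stated in full; the proofs are below) =====
def Claim_equal_stop_words_handling : Prop := ∀ (term : String), Dom_stop_words_handling term → Spec_stop_words_handling term (stop_words_handling term)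

-- ===== LEMMAS AND PROOFS =====

-- erasing one occurrence of sw does not change the result of filtering sw out
theorem pvFilter_erase (sw : String) (xs : List String) :
    (xs.erase sw).filter (fun w => !(w == sw)) = xs.filter (fun w => !(w == sw)) := by
  induction xs with
  | nil => rfl
  | cons x xs ih =>
    by_cases hx : x = sw
    · subst hx; simp
    · rw [List.erase_cons_tail (by simpa using hx)]
      simp only [List.filter_cons, ih]

-- repeatedly removing the first occurrence of sw until none is left = filtering sw out
theorem pvWhileRemove_eq_filter (sw : String) (xs : List String) :
    pvWhileRemove sw xs = xs.filter (fun w => !(w == sw)) := by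
  rw [pvWhileRemove]
  split
  next ys h =>
    have hm : sw ∈ xs := by
      by_contra hn
      simp [(PySem.List.remove?_eq_none_iff xs sw).mpr hn] at h
    rw [PySem.List.remove?_eq_some_erase xs sw hm] at h
    injection h with h
    subst h
    rw [pvWhileRemove_eq_filter sw (xs.erase sw)]
    exact pvFilter_erase sw xs
  next h =>
    have hm : sw ∉ xs := (PySem.List.remove?_eq_none_iff xs sw).mp h
    rw [List.filter_eq_self.mpr]
    intro a ha
    simp only [Bool.not_eq_eq_eq_not, Bool.not_true, beq_eq_false_iff_ne]
    intro he
    exact hm (he ▸ ha)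
termination_by xs.length
decreasing_by
  have hpos := List.length_pos_of_mem hm
  have : (xs.erase sw).length = xs.length - 1 := by
    rw [List.length_erase]; simp [hm]
  omega


-- folding per-word removal over a stop list = one filter by non-membership in that list
theorem pvFoldl_whileRemove (S : List String) (xs : List String) :
    S.foldl (fun xs sw => pvWhileRemove sw xs) xs
      = xs.filter (fun w => !(S.contains w)) := by
  induction S generalizing xs with
  | nil => simp
  | cons s S ih =>
    rw [List.foldl_cons, ih, pvWhileRemove_eq_filter, List.filter_filter]
    apply List.filter_congr
    intro a _
    simp [Bool.and_comm, beq_eq_decide]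

-- A's conditional set difference equals B's unconditional discard
theorem pvDiff_eq_discard (s : PySem.Set String) (x : String) :
    (if x ∈ s then PySem.Set.diff s (PySem.Set.ofList [x]) else s)
      = PySem.Set.discard s x := by
  by_cases hx : x ∈ s
  · rw [if_pos hx]
    simp only [PySem.Set.diff, PySem.Set.discard, PySem.Set.ofList,
      PySem.Set.contains]
    apply List.filter_congr
    intro a _
    simp [beq_eq_decide]
  · rw [if_neg hx]
    simp only [PySem.Set.discard]
    rw [List.filter_eq_self.mpr]
    intro a ha
    simp only [Bool.not_eq_eq_eq_not, Bool.not_true]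
    apply beq_eq_false_iff_ne.mpr
    intro he
    exact hx (he ▸ ha)

-- ===== VERDICT (by name: the statement is the Claim_ definition above) =====
theorem stop_words_handling_spec : Claim_equal_stop_words_handling := by
  intro term _
  unfold Spec_stop_words_handling stop_words_handling stop_words_handling_alt
  by_cases h : (PySem.Str.split₀ term).length < 2
  · simp [h]
  · simp only [h, ite_false]
    rw [pvFoldl_whileRemove, pvDiff_eq_discard]
    rfl
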